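-- pv_equiv track=rewrite | github.com/odafeng/MedFeedJournalTracker | main.py | organize_articles_by_category
-- ===== SOURCE A (Python) =====
-- from typing import Dict, List
--
-- def organize_articles_by_category(articles: List[Dict]) -> Dict[str, Dict[str, List[Dict]]]:
--     """
--     將文章按類別和期刊分組。
--
--     Args:
--         articles: 文章列表
--
--     Returns:
--         Dict[str, Dict[str, List[Dict]]]: 按類別和期刊分組的文章
--             格式: {
--                 'CRC': {journal_name: [articles]},
--                 'SDS': {journal_name: [articles]}
--             }
--     """
--     result = {}
--
--     for article in articles:
--         category = article['category']
--         journal_name = article['journal_name']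
--
--         # 初始化類別
--         if category not in result:
--             result[category] = {}
--
--         # 初始化期刊
--         if journal_name not in result[category]:
--             result[category][journal_name] = []
--
--         # 加入文章
--         result[category][journal_name].append(article)
--
--     return result
-- ===== SOURCE B (Python) =====
-- def organize_articles_by_category(articles):
--     """Group articles by category, then journal name (declarative rebuild).
--
--     Instead of incrementally mutating nested dicts, collect the distinct
--     categories in first-appearance order, and for each category filter its
--     articles and group them by journal via an ordered-dedup of journal names.
--     """
--     categories = list(dict.fromkeys(a['category'] for a in articles))
--     result = {}
--     for c in categories:
--         sub = [a for a in articles if a['category'] == c]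
--         result[c] = {
--             j: [a for a in sub if a['journal_name'] == j]
--             for j in dict.fromkeys(a['journal_name'] for a in sub)
--         }
--     return result
-- ===== Notes on version B (the rewrite author's own statement) =====
-- stated objective: alternative
-- what changed: A incrementally mutates a nested dict while scanning once; B declaratively rebuilds the grouping: ordered-dedup of categories, then per category a filter of the articles and a journal-keyed dict comprehension over the deduped journal names.
import Mathlib
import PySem

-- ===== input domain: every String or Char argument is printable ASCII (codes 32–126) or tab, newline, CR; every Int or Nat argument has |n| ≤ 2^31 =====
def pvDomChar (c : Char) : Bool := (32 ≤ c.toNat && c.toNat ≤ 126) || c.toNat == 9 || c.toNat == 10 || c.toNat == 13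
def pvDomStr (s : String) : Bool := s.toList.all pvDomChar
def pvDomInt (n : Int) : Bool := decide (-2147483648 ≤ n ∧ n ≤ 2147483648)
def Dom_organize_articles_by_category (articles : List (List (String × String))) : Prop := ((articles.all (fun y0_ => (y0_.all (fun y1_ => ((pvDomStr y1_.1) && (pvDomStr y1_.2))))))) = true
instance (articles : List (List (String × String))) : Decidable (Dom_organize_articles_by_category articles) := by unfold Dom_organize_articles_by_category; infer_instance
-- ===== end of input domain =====

-- B rebuilds the grouping declaratively (ordered-dedup of categories, then per-category filters)
-- instead of A's single-pass mutation of a nested dict; alternative decomposition, not claimed faster.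
-- Pre_ excludes exactly the articles missing a 'category'/'journal_name' key, on which Python A raises KeyError.

-- article['k'] on a dict ported as an association list: first-match lookup; exact under Pre_ (key present).
def pvKey (a : List (String × String)) (k : String) : String := (PySem.Dict.mk a).getD k ""

-- ===== PORT A =====
def organize_articles_by_category (articles : List (List (String × String))) : List (String × List (String × List (List (String × String)))) :=
  (articles.foldl (fun result article =>
      let category := pvKey article "category"
      let journal_name := pvKey article "journal_name"
      -- if category not in result: result[category] = {}
      let result := if result.contains category then result else result.insert category PySem.Dict.empty
      -- if journal_name not in result[category]: result[category][journal_name] = []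
      let inner := result.getD category PySem.Dict.empty
      let inner := if inner.contains journal_name then inner else inner.insert journal_name []
      -- result[category][journal_name].append(article)
      let inner := inner.insert journal_name (inner.getD journal_name [] ++ [article])
      result.insert category inner)
    PySem.Dict.empty).items.map (fun p => (p.1, p.2.items))

-- ===== PORT B =====
def organize_articles_by_category_alt (articles : List (List (String × String))) : List (String × List (String × List (List (String × String)))) :=
  (PySem.List.dedup (articles.map (fun a => pvKey a "category"))).map (fun c =>
    let sub := articles.filter (fun a => pvKey a "category" == c)
    (c, (PySem.List.dedup (sub.map (fun a => pvKey a "journal_name"))).map (fun j =>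
          (j, sub.filter (fun a => pvKey a "journal_name" == j)))))

-- ===== PRECONDITION & SPEC =====
-- Pre_ admits exactly the inputs where every article has both keys; elsewhere Python A raises KeyError.
def Pre_organize_articles_by_category (articles : List (List (String × String))) : Prop :=
  (articles.all (fun a => (PySem.Dict.mk a).contains "category" && (PySem.Dict.mk a).contains "journal_name")) = true
instance (articles : List (List (String × String))) : Decidable (Pre_organize_articles_by_category articles) := by
  unfold Pre_organize_articles_by_category; infer_instance
def pvWitness_organize_articles_by_category : (List (List (String × String))) :=
  [[("category", "CRC"), ("journal_name", "Gut")], [("category", "SDS"), ("journal_name", "Gut")]]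

def Spec_organize_articles_by_category (articles : List (List (String × String))) (out : List (String × List (String × List (List (String × String))))) : Prop := out = organize_articles_by_category_alt articles
-- stepwise DecidableEq for the deeply nested output type (default synthesis exceeds its size limit)
def pvDecEqOut : DecidableEq (List (String × List (String × List (List (String × String))))) :=
  have d1 : DecidableEq (List (String × String)) := inferInstance
  have d2 : DecidableEq (List (List (String × String))) := @instDecidableEqList _ d1
  have d3 : DecidableEq (String × List (List (String × String))) := @instDecidableEqProd _ _ _ d2
  have d4 : DecidableEq (List (String × List (List (String × String)))) := @instDecidableEqList _ d3
  have d5 : DecidableEq (String × List (String × List (List (String × String)))) := @instDecidableEqProd _ _ _ d4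
  @instDecidableEqList _ d5
instance (articles : List (List (String × String))) (out : List (String × List (String × List (List (String × String))))) : Decidable (Spec_organize_articles_by_category articles out) := by unfold Spec_organize_articles_by_category; exact pvDecEqOut out _

-- ===== CLAIM (what is proved, stated in full; the proofs are below) =====
def Claim_equal_organize_articles_by_category : Prop := ∀ (articles : List (List (String × String))), Dom_organize_articles_by_category articles → Pre_organize_articles_by_category articles → Spec_organize_articles_by_category articles (organize_articles_by_category articles)

-- ===== LEMMAS AND PROOFS =====

-- abbreviations for the two key projections
def catOf (a : List (String × String)) : String := pvKey a "category"
def jouOf (a : List (String × String)) : String := pvKey a "journal_name"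

-- A's loop body, named
def stepA (result : PySem.Dict String (PySem.Dict String (List (List (String × String)))))
    (article : List (String × String)) :
    PySem.Dict String (PySem.Dict String (List (List (String × String)))) :=
  let category := catOf article
  let journal_name := jouOf article
  let result := if result.contains category then result else result.insert category PySem.Dict.empty
  let inner := result.getD category PySem.Dict.empty
  let inner := if inner.contains journal_name then inner else inner.insert journal_name []
  let inner := inner.insert journal_name (inner.getD journal_name [] ++ [article])
  result.insert category inner

-- B's inner table for category c, and the full table of B, as item lists
def innerItems (c : String) (xs : List (List (String × String))) : List (String × List (List (String × String))) :=
  (PySem.List.dedup ((xs.filter (fun a => catOf a == c)).map (fun a => jouOf a))).map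
    (fun j => (j, (xs.filter (fun a => catOf a == c)).filter (fun a => jouOf a == j)))

def outItems (xs : List (List (String × String))) :
    List (String × PySem.Dict String (List (List (String × String)))) :=
  (PySem.List.dedup (xs.map (fun a => catOf a))).map (fun c => (c, PySem.Dict.mk (innerItems c xs)))

theorem dedup_snoc (l : List String) (x : String) :
    PySem.List.dedup (l ++ [x]) = if x ∈ PySem.List.dedup l then PySem.List.dedup l else PySem.List.dedup l ++ [x] := by
  simp only [PySem.List.dedup, PySem.Set.ofList, List.foldl_append, List.foldl_cons, List.foldl_nil,
    PySem.Set.add]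
  by_cases h : x ∈ List.foldl PySem.Set.add PySem.Set.empty l <;> simp [PySem.Set.contains]

-- replacing the entry at key c in a keyed map
theorem map_replace {β : Type} (l : List String) (f : String → β) (c : String) (v : β) :
    (l.map (fun c' => (c', f c'))).map (fun p => if p.1 == c then (c, v) else p)
      = l.map (fun c' => (c', if c' = c then v else f c')) := by
  rw [List.map_map]
  apply List.map_congr_left
  intro c' _
  by_cases h : c' = c <;> simp [h]

theorem innerItems_snoc_ne (c : String) (xs : List (List (String × String))) (x : List (String × String))
    (h : catOf x ≠ c) : innerItems c (xs ++ [x]) = innerItems c xs := by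
  simp [innerItems, List.filter_append, h]

theorem filter_snoc_eq (xs : List (List (String × String))) (x : List (String × String)) (c : String)
    (h : catOf x = c) :
    (xs ++ [x]).filter (fun a => catOf a == c) = xs.filter (fun a => catOf a == c) ++ [x] := by
  simp [List.filter_append, h]

theorem keys_out (xs : List (List (String × String))) :
    (PySem.Dict.mk (outItems xs)).keys = PySem.List.dedup (xs.map (fun a => catOf a)) := by
  simp [outItems, PySem.Dict.keys_mk, List.map_map, Function.comp_def]

theorem contains_out (xs : List (List (String × String))) (c : String) :
    (PySem.Dict.mk (outItems xs)).contains c = decide (c ∈ xs.map (fun a => catOf a)) := by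
  rw [PySem.Dict.contains_eq_decide_mem_keys, keys_out]
  simp

theorem getD_out (xs : List (List (String × String))) (c : String)
    (hc : c ∈ xs.map (fun a => catOf a)) (d0 : PySem.Dict String (List (List (String × String)))) :
    (PySem.Dict.mk (outItems xs)).getD c d0 = PySem.Dict.mk (innerItems c xs) := by
  apply PySem.Dict.getD_of_mem_items
  · simp only [outItems]
    exact List.mem_map_of_mem ((PySem.List.mem_dedup _ _).mpr hc)
  · rw [keys_out]; exact PySem.List.nodup_dedup _

theorem keys_inner (c : String) (xs : List (List (String × String))) :
    (PySem.Dict.mk (innerItems c xs)).keys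
      = PySem.List.dedup ((xs.filter (fun a => catOf a == c)).map (fun a => jouOf a)) := by
  simp [innerItems, PySem.Dict.keys_mk, List.map_map, Function.comp_def]

theorem contains_inner (c : String) (xs : List (List (String × String))) (j : String) :
    (PySem.Dict.mk (innerItems c xs)).contains j
      = decide (j ∈ (xs.filter (fun a => catOf a == c)).map (fun a => jouOf a)) := by
  rw [PySem.Dict.contains_eq_decide_mem_keys, keys_inner]
  simp

theorem getD_inner (c : String) (xs : List (List (String × String))) (j : String)
    (hj : j ∈ (xs.filter (fun a => catOf a == c)).map (fun a => jouOf a))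
    (d0 : List (List (String × String))) :
    (PySem.Dict.mk (innerItems c xs)).getD j d0
      = (xs.filter (fun a => catOf a == c)).filter (fun a => jouOf a == j) := by
  apply PySem.Dict.getD_of_mem_items
  · simp only [innerItems]
    exact List.mem_map_of_mem ((PySem.List.mem_dedup _ _).mpr hj)
  · rw [keys_inner]; exact PySem.List.nodup_dedup _

-- the inner dict update performed by stepA equals B's inner table for xs ++ [x]
theorem inner_snoc (xs : List (List (String × String))) (x : List (String × String)) :
    (let inner := PySem.Dict.mk (innerItems (catOf x) xs)
     let inner := if inner.contains (jouOf x) then inner else inner.insert (jouOf x) []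
     inner.insert (jouOf x) (inner.getD (jouOf x) [] ++ [x]))
      = PySem.Dict.mk (innerItems (catOf x) (xs ++ [x])) := by
  have hfil := filter_snoc_eq xs x (catOf x) rfl
  by_cases hj : jouOf x ∈ (xs.filter (fun a => catOf a == (catOf x))).map (fun a => jouOf a)
  · -- journal already present: overwrite its list in place
    simp only [contains_inner, hj, decide_true, if_true]
    rw [getD_inner _ _ _ hj]
    apply PySem.Dict.ext
    rw [PySem.Dict.items_insert_of_contains _ _ (by rw [contains_inner]; simp [hj])]
    show (innerItems (catOf x) xs).map _ = innerItems (catOf x) (xs ++ [x])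
    simp only [innerItems, hfil, List.map_append, List.map_cons, List.map_nil]
    rw [dedup_snoc, if_pos ((PySem.List.mem_dedup _ _).mpr hj), map_replace]
    apply List.map_congr_left
    intro j hjmem
    by_cases h : j = jouOf x
    · subst h; simp [List.filter_append]
    · have : ¬ (jouOf x == j) = true := by simp [Ne.symm h]
      simp [List.filter_append, h, this]
  · -- new journal: append a fresh entry
    simp only [contains_inner, hj, decide_false, if_false, Bool.false_eq_true]
    rw [PySem.Dict.insert_insert_self, PySem.Dict.getD_insert_self]
    apply PySem.Dict.ext
    rw [PySem.Dict.items_insert_of_not_contains _ _ (by rw [contains_inner]; simp [hj])]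
    show innerItems (catOf x) xs ++ [(jouOf x, [] ++ [x])] = innerItems (catOf x) (xs ++ [x])
    have hfilnil : (xs.filter (fun a => catOf a == catOf x)).filter (fun a => jouOf a == jouOf x) = [] := by
      rw [List.filter_eq_nil_iff]
      intro a ha
      simp only [beq_iff_eq]
      intro h
      exact hj (List.mem_map.mpr ⟨a, ha, h⟩)
    simp only [innerItems, hfil, List.map_append, List.map_cons, List.map_nil]
    rw [dedup_snoc, if_neg (fun h => hj ((PySem.List.mem_dedup _ _).mp h)), List.map_append]
    congr 1
    · apply List.map_congr_left
      intro j hjmem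
      have hne : j ≠ jouOf x := fun h => hj (h ▸ (PySem.List.mem_dedup _ _).mp hjmem)
      have : ¬ (jouOf x == j) = true := by simp [Ne.symm hne]
      simp [List.filter_append, this]
    · simp only [List.map_cons, List.map_nil, List.filter_append, hfilnil]
      simp

-- the invariant of A's fold
theorem foldA_eq (xs : List (List (String × String))) :
    xs.foldl stepA PySem.Dict.empty = PySem.Dict.mk (outItems xs) := by
  induction xs using List.reverseRecOn with
  | nil => rfl
  | append_singleton xs x ih =>
    rw [List.foldl_append, List.foldl_cons, List.foldl_nil, ih]
    by_cases hc : catOf x ∈ xs.map (fun a => catOf a)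
    · simp only [stepA, contains_out, hc, decide_true, if_true]
      rw [getD_out xs _ hc]
      rw [inner_snoc]
      apply PySem.Dict.ext
      rw [PySem.Dict.items_insert_of_contains _ _ (by rw [contains_out]; simp [hc])]
      show (outItems xs).map _ = outItems (xs ++ [x])
      simp only [outItems, List.map_append, List.map_cons, List.map_nil]
      rw [dedup_snoc, if_pos ((PySem.List.mem_dedup _ _).mpr hc), map_replace]
      apply List.map_congr_left
      intro c' _
      by_cases h : c' = catOf x
      · simp [h]
      · simp [h, innerItems_snoc_ne _ _ _ (fun hh => h hh.symm)]
    · have hnil : innerItems (catOf x) xs = [] := by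
        have : xs.filter (fun a => catOf a == catOf x) = [] := by
          rw [List.filter_eq_nil_iff]
          intro a ha h
          exact hc (List.mem_map.mpr ⟨a, ha, (beq_iff_eq).mp h⟩)
        simp [innerItems, this]
      simp only [stepA, contains_out, hc, decide_false, Bool.false_eq_true, if_false]
      rw [PySem.Dict.getD_insert_self]
      rw [show (PySem.Dict.empty : PySem.Dict String (List (List (String × String)))) = PySem.Dict.mk (innerItems (catOf x) xs) from by rw [hnil]; rfl]
      rw [inner_snoc, PySem.Dict.insert_insert_self]
      apply PySem.Dict.ext
      rw [PySem.Dict.items_insert_of_not_contains _ _ (by rw [contains_out]; simp [hc])]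
      show outItems xs ++ [(catOf x, PySem.Dict.mk (innerItems (catOf x) (xs ++ [x])))] = outItems (xs ++ [x])
      simp only [outItems, List.map_append, List.map_cons, List.map_nil]
      rw [dedup_snoc, if_neg (fun h => hc ((PySem.List.mem_dedup _ _).mp h)), List.map_append]
      congr 1
      apply List.map_congr_left
      intro c' hmem
      have hne : catOf x ≠ c' := fun h => hc (h ▸ (PySem.List.mem_dedup _ _).mp hmem)
      rw [innerItems_snoc_ne _ _ _ hne]

theorem main_lemma : ∀ (articles : List (List (String × String))),
    organize_articles_by_category articles = organize_articles_by_category_alt articles := by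
  intro articles
  have h : organize_articles_by_category articles
      = (articles.foldl stepA PySem.Dict.empty).items.map (fun p => (p.1, p.2.items)) := rfl
  rw [h, foldA_eq]
  simp only [organize_articles_by_category_alt]
  simp [outItems, innerItems, List.map_map, catOf, jouOf, Function.comp_def]

-- ===== VERDICT (by name: the statement is the Claim_ definition above) =====
theorem organize_articles_by_category_spec : Claim_equal_organize_articles_by_category := by
  intro articles _ _
  exact main_lemma articles
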